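-- pv_equiv track=rewrite | github.com/jackbr4/bookshelf-portal | bookshelf-portal/backend/app/search_adapter.py | _parse_author_title
-- ===== SOURCE A (Python) =====
-- def _parse_author_title(author_title: str) -> str:
--     """Convert Bookshelf 'Lastname, Firstname Book Title' → 'Firstname Lastname'."""
--     parts = author_title.split(" ")
--     name_parts: list[str] = []
--     for part in parts:
--         name_parts.append(part)
--         if len(name_parts) >= 2 and name_parts[0].endswith(","):
--             break
--     if len(name_parts) >= 2:
--         last = name_parts[0].rstrip(",")
--         first = name_parts[1]
--         return f"{first} {last}"
--     return parts[0] if parts else ""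
-- ===== SOURCE B (Python) =====
-- def _parse_author_title(author_title: str) -> str:
--     parts = author_title.split(" ")
--     if len(parts) >= 2:
--         return f"{parts[1]} {parts[0].rstrip(',')}"
--     return parts[0]
-- ===== Notes on version B (the rewrite author's own statement) =====
-- stated objective: simpler
-- what changed: B drops A's accumulation loop with its break condition entirely and indexes the first two split tokens directly, since A's loop state beyond the first two tokens is dead.
import Mathlib
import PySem

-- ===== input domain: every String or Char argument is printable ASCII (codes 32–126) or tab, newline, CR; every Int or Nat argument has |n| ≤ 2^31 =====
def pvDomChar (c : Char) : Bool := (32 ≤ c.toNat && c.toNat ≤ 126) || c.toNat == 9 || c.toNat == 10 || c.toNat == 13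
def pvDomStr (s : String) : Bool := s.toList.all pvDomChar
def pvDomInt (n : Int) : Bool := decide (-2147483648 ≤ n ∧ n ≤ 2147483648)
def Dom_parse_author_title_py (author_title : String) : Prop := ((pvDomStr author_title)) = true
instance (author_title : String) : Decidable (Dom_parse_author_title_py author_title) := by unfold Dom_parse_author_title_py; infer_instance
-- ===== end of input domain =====

-- B keeps A's return value on every input but replaces the accumulation loop (whose state past
-- the first two tokens is dead) by direct indexing of the first two split tokens.

-- exact port of str.rstrip(","): remove all trailing ',' characters (used by both Pythons)
def pvRstripComma (cs : List Char) : List Char := (cs.reverse.dropWhile (· == ',')).reverse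

-- ===== PORT A =====
-- the 'for part in parts: append; break if …' loop of A, state = name_parts
def pvALoop : List (List Char) → List (List Char) → List (List Char)
  | [], name_parts => name_parts
  | part :: rest, name_parts =>
    let np := name_parts ++ [part]
    if decide (2 ≤ np.length) && PySem.Chars.endswith (np.headD []) [','] then np
    else pvALoop rest np

def parse_author_title_py (author_title : String) : String :=
  let parts := PySem.Chars.splitOn author_title.toList [' ']
  let name_parts := pvALoop parts []
  if 2 ≤ name_parts.length then
    let last := pvRstripComma (name_parts.headD [])
    let first := (name_parts.drop 1).headD []
    String.ofList (first ++ ' ' :: last)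
  else
    match parts with
    | [] => ""
    | p :: _ => String.ofList p

-- ===== PORT B =====
def parse_author_title_py_alt (author_title : String) : String :=
  match PySem.Chars.splitOn author_title.toList [' '] with
  | p0 :: p1 :: _ => String.ofList (p1 ++ ' ' :: pvRstripComma p0)
  | [p0] => String.ofList p0
  | [] => String.ofList []  -- unreachable: split never returns an empty list

-- ===== PRECONDITION & SPEC =====
def Spec_parse_author_title_py (author_title : String) (out : String) : Prop := out = parse_author_title_py_alt author_title
instance (author_title : String) (out : String) : Decidable (Spec_parse_author_title_py author_title out) := by unfold Spec_parse_author_title_py; infer_instance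

-- ===== CLAIM (what is proved, stated in full; the proofs are below) =====
def Claim_equal_parse_author_title_py : Prop := ∀ (author_title : String), Dom_parse_author_title_py author_title → Spec_parse_author_title_py author_title (parse_author_title_py author_title)

-- ===== LEMMAS AND PROOFS =====

-- A's loop only ever appends to its accumulator
theorem pvALoop_append (rest : List (List Char)) : ∀ (acc : List (List Char)), ∃ t, pvALoop rest acc = acc ++ t := by
  induction rest with
  | nil => intro acc; exact ⟨[], by simp [pvALoop]⟩
  | cons p rest ih =>
    intro acc
    simp only [pvALoop]
    split
    · exact ⟨[p], rfl⟩
    · obtain ⟨t, ht⟩ := ih (acc ++ [p])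
      exact ⟨[p] ++ t, by simp [ht]⟩

-- ===== VERDICT (by name: the statement is the Claim_ definition above) =====
theorem parse_author_title_py_spec : Claim_equal_parse_author_title_py := by
  intro s _
  show parse_author_title_py s = parse_author_title_py_alt s
  unfold parse_author_title_py parse_author_title_py_alt
  cases hp : PySem.Chars.splitOn s.toList [' '] with
  | nil => simp [pvALoop]
  | cons p0 ps =>
    cases ps with
    | nil => simp [pvALoop]
    | cons p1 rest =>
      have h1 : pvALoop (p0 :: p1 :: rest) [] =
          if decide (2 ≤ ([p0, p1] : List (List Char)).length) &&
             PySem.Chars.endswith (([p0, p1] : List (List Char)).headD []) [','] then [p0, p1]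
          else pvALoop rest [p0, p1] := by
        simp [pvALoop]
      by_cases hc : (decide (2 ≤ ([p0, p1] : List (List Char)).length) &&
          PySem.Chars.endswith (([p0, p1] : List (List Char)).headD []) [',']) = true
      · simp only [h1, hc, if_pos]
        simp
      · simp only [h1, hc]
        obtain ⟨t, ht⟩ := pvALoop_append rest [p0, p1]
        simp [ht]
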